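-- pv_equiv track=rewrite | github.com/fossasia/pslab-python | pslab/peripherals.py | __decode_I2C_list__
-- ===== SOURCE A (Python) =====
-- def __decode_I2C_list__(data):
--     lst = []
--     if sum(data) == 0:
--         return lst
--     for i, d in enumerate(data):
--         if (d ^ 255):
--             for b in range(8):
--                 if d & (0x80 >> b) == 0:
--                     addr = 8 * i + b
--                     lst.append(addr)
--     return lst
-- ===== SOURCE B (Python) =====
-- # Backwards single pass: walk the bytes in reverse, extract zero-bit positions by
-- # repeated divmod on the complement byte (no bit masks, early exit when the
-- # complement runs out of set bits), appending addresses in strictly descending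
-- # order; one final reversal restores ascending order.  The sum(data)==0 guard is
-- # part of the function's contract (it also fires on e.g. [1, -1]) and is kept.
-- def __decode_I2C_list__(data):
--     if sum(data) == 0:
--         return []
--     out = []
--     for i, d in reversed(list(enumerate(data))):
--         c = ~d & 255          # complement byte: bit k set <=> d's bit k clear
--         b = 7
--         while c:
--             c, r = divmod(c, 2)
--             if r:
--                 out.append(8 * i + b)
--             b -= 1
--     return out[::-1]
-- ===== Notes on version B (the rewrite author's own statement) =====
-- stated objective: alternative
-- what changed: B walks the bytes in reverse, extracts zero-bit positions per byte by repeated divmod on the complement byte (~d & 255, early exit when it reaches 0) instead of testing 8 masks, appends addresses in descending order and reverses once at the end; A scans forward testing d & (0x80>>b) for all 8 b.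
import Mathlib
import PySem

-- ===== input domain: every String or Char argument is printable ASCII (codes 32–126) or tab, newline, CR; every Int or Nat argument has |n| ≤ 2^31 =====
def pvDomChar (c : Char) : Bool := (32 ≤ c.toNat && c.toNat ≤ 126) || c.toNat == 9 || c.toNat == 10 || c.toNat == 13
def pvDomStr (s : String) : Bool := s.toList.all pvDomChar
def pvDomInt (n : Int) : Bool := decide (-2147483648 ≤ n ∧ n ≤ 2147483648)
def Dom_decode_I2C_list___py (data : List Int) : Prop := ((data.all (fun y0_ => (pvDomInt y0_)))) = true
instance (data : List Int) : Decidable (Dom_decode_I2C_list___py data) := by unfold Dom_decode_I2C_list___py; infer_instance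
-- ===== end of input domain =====

-- B is a backwards single pass: per byte it extracts zero-bit positions by repeated
-- divmod on the complement byte (~d & 255) instead of testing 8 masks, appends
-- addresses in descending order and reverses once at the end; objective: alternative.


-- ===== PORT A =====
def decode_I2C_list___py (data : List Int) : List Int :=
  let lst : List Int := []
  if data.sum = 0 then lst
  else
    (PySem.List.enumerate data).foldl (fun lst p =>
      if PySem.Int.bxor p.2 255 ≠ 0 then
        (List.range 8).foldl (fun lst (b : Nat) =>
          if PySem.Int.band p.2 ((128 : Int) >>> b) = 0 then lst ++ [8 * p.1 + (b : Int)]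
          else lst) lst
      else lst) lst

-- ===== PORT B =====
-- the 'while c: c, r = divmod(c, 2); if r: out.append(8*i+b); b -= 1' loop;
-- c = ~d & 255 is nonnegative, so Nat division/mod here is exact Python divmod.
-- The first argument is fuel making the recursion structural; the loop halves c,
-- so fuel = c (passed at the call site) is always enough and changes nothing.
def pvWhileB : Nat → Nat → Int → Int → List Int → List Int
  | _, 0, _, _, out => out
  | 0, _ + 1, _, _, out => out
  | f + 1, c + 1, i, b, out =>
      pvWhileB f ((c + 1) / 2) i (b - 1) (if (c + 1) % 2 = 1 then out ++ [8 * i + b] else out)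

-- reversed(list(enumerate(data))) → (enumerate data).reverse;  out[::-1] → .reverse
def decode_I2C_list___py_alt (data : List Int) : List Int :=
  if data.sum = 0 then []
  else
    ((PySem.List.enumerate data).reverse.foldl (fun out p =>
      pvWhileB (PySem.Int.band (-p.2 - 1) 255).toNat
        (PySem.Int.band (-p.2 - 1) 255).toNat p.1 7 out) []).reverse

-- ===== PRECONDITION & SPEC =====
def Spec_decode_I2C_list___py (data : List Int) (out : List Int) : Prop := out = decode_I2C_list___py_alt data
instance (data : List Int) (out : List Int) : Decidable (Spec_decode_I2C_list___py data out) := by unfold Spec_decode_I2C_list___py; infer_instance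

-- ===== CLAIM (what is proved, stated in full; the proofs are below) =====
def Claim_equal_decode_I2C_list___py : Prop := ∀ (data : List Int), Dom_decode_I2C_list___py data → Spec_decode_I2C_list___py data (decode_I2C_list___py data)

-- ===== LEMMAS AND PROOFS =====

-- proof-side per-byte tables (used only below, never by the ports)
def pvTableEntry (d : Nat) : List Int :=
  ((List.range 8).filter (fun b => (d >>> (7 - b)) &&& 1 == 0)).map (fun b => (b : Int))

def pvTable : List (List Int) := (List.range 256).map pvTableEntry

-- pure bit-extraction trace of pvWhileB, with the 8*i offset factored out
def pvBits : Nat → Nat → Int → List Int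
  | _, 0, _ => []
  | 0, _ + 1, _ => []
  | f + 1, c + 1, b => (if (c + 1) % 2 = 1 then [b] else []) ++ pvBits f ((c + 1) / 2) (b - 1)

theorem pvWhileB_eq (f : Nat) : ∀ (c : Nat) (i b : Int) (out : List Int),
    pvWhileB f c i b out = out ++ (pvBits f c b).map (fun x => 8 * i + x) := by
  induction f with
  | zero =>
    intro c i b out
    cases c with
    | zero => simp [pvWhileB, pvBits]
    | succ c => simp [pvWhileB, pvBits]
  | succ f ih =>
    intro c i b out
    cases c with
    | zero => simp [pvWhileB, pvBits]
    | succ c =>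
      rw [pvWhileB, pvBits, ih]
      by_cases hr : (c + 1) % 2 = 1 <;> simp [hr]

theorem pv_foldl_ext {α β : Type} (g₁ g₂ : β → α → β) (l : List α)
    (h : ∀ acc x, g₁ acc x = g₂ acc x) : ∀ acc, l.foldl g₁ acc = l.foldl g₂ acc := by
  induction l with
  | nil => intro acc; rfl
  | cons y ys ih => intro acc; simp only [List.foldl_cons, h, ih]

theorem pv_foldl_append_if {α β : Type} (p : α → Prop) [DecidablePred p] (f : α → β) (bs : List α) :
    ∀ acc : List β,
      bs.foldl (fun l b => if p b then l ++ [f b] else l) acc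
        = acc ++ (bs.filter (fun b => p b)).map f := by
  induction bs with
  | nil => intro acc; simp
  | cons x xs ih =>
    intro acc
    by_cases h : p x <;> simp [h, ih]

-- evaluation shapes of PySem.Int.band against a natural-number mask
theorem pv_band_nonneg_eval (d : Int) (h : 0 ≤ d) (m : Nat) :
    PySem.Int.band d (m : Int) = ((d.toNat &&& m : Nat) : Int) := by
  unfold PySem.Int.band; simp [h]

theorem pv_band_neg_eval (d : Int) (h : ¬ 0 ≤ d) (m : Nat) :
    PySem.Int.band d (m : Int) = ((m - (m &&& (-d - 1).toNat) : Nat) : Int) := by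
  unfold PySem.Int.band; simp [h]

theorem pv_and255 (n : Nat) : n &&& 255 = n % 256 := Nat.and_two_pow_sub_one_eq_mod n 8

theorem pv_and_low (m n : Nat) (hm : m &&& 255 = m) : m &&& n = m &&& (n % 256) := by
  calc m &&& n = (m &&& 255) &&& n := by rw [hm]
    _ = m &&& (255 &&& n) := Nat.and_assoc ..
    _ = m &&& (n &&& 255) := by rw [Nat.and_comm 255 n]
    _ = m &&& (n % 256) := by rw [pv_and255]

theorem pv_band255_lt (d : Int) : (PySem.Int.band d (255 : Int)).toNat < 256 := by
  have h255 : ((255 : Nat) : Int) = (255 : Int) := by norm_num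
  by_cases h : 0 ≤ d
  · rw [← h255, pv_band_nonneg_eval d h 255]
    have := pv_and255 d.toNat
    simp [this]; omega
  · rw [← h255, pv_band_neg_eval d h 255]
    simp; omega

-- the complement byte: (~d) & 255 = 255 - (d & 255)
theorem pv_comp_byte (d : Int) :
    (PySem.Int.band (-d - 1) (255 : Int)).toNat = 255 - (PySem.Int.band d (255 : Int)).toNat := by
  have h255 : ((255 : Nat) : Int) = (255 : Int) := by norm_num
  by_cases h : 0 ≤ d
  · have hneg : ¬ 0 ≤ -d - 1 := by omega
    rw [← h255, pv_band_neg_eval (-d - 1) hneg 255, pv_band_nonneg_eval d h 255]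
    have : - (-d - 1) - 1 = d := by ring
    rw [this]
    have h1 : 255 &&& d.toNat = d.toNat % 256 := by rw [Nat.and_comm, pv_and255]
    have h2 : d.toNat &&& 255 = d.toNat % 256 := pv_and255 d.toNat
    simp only [Int.toNat_natCast, h1, h2]
  · have hpos : 0 ≤ -d - 1 := by omega
    rw [← h255, pv_band_nonneg_eval (-d - 1) hpos 255, pv_band_neg_eval d h 255]
    set n := (-d - 1).toNat with hn
    have h1 : n &&& 255 = n % 256 := pv_and255 _
    have h2 : 255 &&& n = n % 256 := by rw [Nat.and_comm, pv_and255]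
    have h3 : n % 256 < 256 := Nat.mod_lt _ (by norm_num)
    simp only [Int.toNat_natCast, h1, h2]
    omega

-- band d m for a mask m inside the low byte depends on d only through (band d 255)
theorem pv_band_mask (d : Int) (m : Nat) (hm : m &&& 255 = m)
    (hneg : ∀ r : Nat, r < 256 → (255 - (255 &&& r)) &&& m = m - (m &&& r)) :
    PySem.Int.band d (m : Int)
      = PySem.Int.band (((PySem.Int.band d (255 : Int)).toNat : Nat) : Int) (m : Int) := by
  have h255 : ((255 : Nat) : Int) = (255 : Int) := by norm_num
  rw [PySem.Int.band_natCast]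
  by_cases h : 0 ≤ d
  · rw [pv_band_nonneg_eval d h m, ← h255, pv_band_nonneg_eval d h 255]
    have : (d.toNat &&& 255) &&& m = d.toNat &&& m := by
      rw [Nat.and_assoc, Nat.and_comm 255 m, hm]
    simp [this]
  · rw [pv_band_neg_eval d h m, ← h255, pv_band_neg_eval d h 255]
    set n := (-d - 1).toNat with hn
    have h1 : 255 &&& n = n % 256 := by rw [Nat.and_comm, pv_and255]
    have h2 : m &&& n = m &&& (n % 256) := pv_and_low m n hm
    have h3 : 255 &&& (n % 256) = n % 256 := by
      rw [Nat.and_comm, pv_and255]; omega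
    have h4 := hneg (n % 256) (Nat.mod_lt _ (by norm_num))
    rw [h3] at h4
    rw [h1, h2, ← h4]
    norm_num

theorem pv_bxor255_eq (d : Int) (h : PySem.Int.bxor d 255 = 0) : d = 255 := by
  unfold PySem.Int.bxor at h
  by_cases hd : 0 ≤ d
  · simp [hd] at h; omega
  · simp [hd] at h; omega

theorem pv_mask_in255 : ∀ b : Nat, b < 8 → (128 >>> b) &&& 255 = 128 >>> b := by decide

set_option maxRecDepth 16384 in
theorem pv_neg_check : ∀ b : Nat, b < 8 → ∀ r : Nat, r < 256 →
    (255 - (255 &&& r)) &&& (128 >>> b) = (128 >>> b) - ((128 >>> b) &&& r) := by decide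

theorem pv_shift_cast : ∀ b : Nat, b < 8 → ((128 : Int) >>> b) = (((128 >>> b : Nat)) : Int) := by
  decide

-- byte-level check: A's inner filter equals the table entry, for every byte value
set_option maxRecDepth 16384 in
theorem pv_byte_check : ∀ r : Nat, r < 256 →
    ((List.range 8).filter (fun (b : Nat) => PySem.Int.band (r : Int) ((128 : Int) >>> b) = 0)).map
        (fun b => (b : Int)) = pvTable.getD r [] := by
  decide

-- byte-level check: B's reversed divmod trace on the complement equals the table entry
set_option maxRecDepth 16384 in
theorem pv_bits_check : ∀ r : Nat, r < 256 →
    (pvBits (255 - r) (255 - r) 7).reverse = pvTable.getD r [] := by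
  decide

theorem pv_inner_eq (d : Int) :
    ((List.range 8).filter (fun (b : Nat) => PySem.Int.band d ((128 : Int) >>> b) = 0)).map
        (fun b => (b : Int)) = pvTable.getD (PySem.Int.band d (255 : Int)).toNat [] := by
  have hmask : ∀ b : Nat, b < 8 →
      PySem.Int.band d ((128 : Int) >>> b)
        = PySem.Int.band (((PySem.Int.band d (255 : Int)).toNat : Nat) : Int) ((128 : Int) >>> b) := by
    intro b hb
    rw [pv_shift_cast b hb]
    exact pv_band_mask d (128 >>> b) (pv_mask_in255 b hb) (pv_neg_check b hb)
  have hfilter :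
      (List.range 8).filter (fun (b : Nat) => PySem.Int.band d ((128 : Int) >>> b) = 0)
        = (List.range 8).filter
            (fun (b : Nat) => PySem.Int.band (((PySem.Int.band d (255 : Int)).toNat : Nat) : Int)
              ((128 : Int) >>> b) = 0) := by
    apply List.filter_congr
    intro b hb
    rw [hmask b (List.mem_range.mp hb)]
  rw [hfilter]
  exact pv_byte_check _ (pv_band255_lt d)

-- A's per-element block
def pvBlockA (p : Int × Int) : List Int :=
  (pvTable.getD (PySem.Int.band p.2 (255 : Int)).toNat []).map (fun b => 8 * p.1 + b)

-- A's per-element step appends exactly pvBlockA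
theorem pv_stepA (p : Int × Int) (acc : List Int) :
    (if PySem.Int.bxor p.2 255 ≠ 0 then
        (List.range 8).foldl (fun lst (b : Nat) =>
          if PySem.Int.band p.2 ((128 : Int) >>> b) = 0 then lst ++ [8 * p.1 + (b : Int)]
          else lst) acc
      else acc) = acc ++ pvBlockA p := by
  by_cases hx : PySem.Int.bxor p.2 255 = 0
  · have hd : p.2 = 255 := pv_bxor255_eq p.2 hx
    rw [if_neg (by simp [hx])]
    unfold pvBlockA
    rw [hd]
    have h1 : (PySem.Int.band (255 : Int) 255).toNat = 255 := by decide
    have h2 : pvTable.getD 255 [] = ([] : List Int) := by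
      set_option maxRecDepth 16384 in decide
    rw [h1, h2]
    simp
  · rw [if_pos hx,
      pv_foldl_append_if (fun (b : Nat) => PySem.Int.band p.2 ((128 : Int) >>> b) = 0)
        (fun b : Nat => 8 * p.1 + (b : Int)) (List.range 8) acc]
    unfold pvBlockA
    congr 1
    rw [← pv_inner_eq p.2]
    have hflat : ∀ l : List Nat,
        List.flatMap (fun (a : Nat) => [(a : Int)]) l = l.map (fun (a : Nat) => (a : Int)) := by
      intro l; induction l <;> simp [*]
    simp [hflat, List.map_map, Function.comp_def]

-- B's per-element block (before the final reversal)
def pvBlockB (p : Int × Int) : List Int :=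
  (pvBits (255 - (PySem.Int.band p.2 (255 : Int)).toNat)
    (255 - (PySem.Int.band p.2 (255 : Int)).toNat) 7).map (fun x => 8 * p.1 + x)

theorem pv_blockB_rev (p : Int × Int) : (pvBlockB p).reverse = pvBlockA p := by
  unfold pvBlockB pvBlockA
  rw [← List.map_reverse, pv_bits_check _ (pv_band255_lt p.2)]

-- ===== VERDICT (by name: the statement is the Claim_ definition above) =====
theorem decode_I2C_list___py_spec : Claim_equal_decode_I2C_list___py := by
  intro data _
  unfold Spec_decode_I2C_list___py decode_I2C_list___py decode_I2C_list___py_alt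
  by_cases h : data.sum = 0
  · simp [h]
  · rw [if_neg h, if_neg h]
    have hA : (PySem.List.enumerate data).foldl (fun lst p =>
        if PySem.Int.bxor p.2 255 ≠ 0 then
          (List.range 8).foldl (fun lst (b : Nat) =>
            if PySem.Int.band p.2 ((128 : Int) >>> b) = 0 then lst ++ [8 * p.1 + (b : Int)]
            else lst) lst
        else lst) ([] : List Int) = (PySem.List.enumerate data).flatMap pvBlockA := by
      have hstep : ((PySem.List.enumerate data).foldl (fun lst p =>
          if PySem.Int.bxor p.2 255 ≠ 0 then
            (List.range 8).foldl (fun lst (b : Nat) =>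
              if PySem.Int.band p.2 ((128 : Int) >>> b) = 0 then lst ++ [8 * p.1 + (b : Int)]
              else lst) lst
          else lst) ([] : List Int))
            = (PySem.List.enumerate data).foldl (fun lst p => lst ++ pvBlockA p) [] := by
        exact pv_foldl_ext _ _ _ (fun acc p => pv_stepA p acc) []
      rw [hstep, PySem.List.foldl_append_eq_flatMap]
      simp
    have hB : ((PySem.List.enumerate data).reverse.foldl (fun out p =>
        pvWhileB (PySem.Int.band (-p.2 - 1) 255).toNat
          (PySem.Int.band (-p.2 - 1) 255).toNat p.1 7 out) ([] : List Int)).reverse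
          = (PySem.List.enumerate data).flatMap pvBlockA := by
      have hstep : ((PySem.List.enumerate data).reverse.foldl (fun out p =>
          pvWhileB (PySem.Int.band (-p.2 - 1) 255).toNat
            (PySem.Int.band (-p.2 - 1) 255).toNat p.1 7 out) ([] : List Int))
            = (PySem.List.enumerate data).reverse.foldl (fun out p => out ++ pvBlockB p) [] := by
        apply pv_foldl_ext _ _ _ (fun acc p => ?_) []
        rw [pvWhileB_eq]
        unfold pvBlockB
        rw [pv_comp_byte p.2]
      rw [hstep, PySem.List.foldl_append_eq_flatMap]
      simp only [List.nil_append]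
      rw [List.reverse_flatMap]
      simp only [List.reverse_reverse, Function.comp_def, pv_blockB_rev]
    rw [hA, ← hB]
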